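-- pv_equiv track=rewrite | github.com/sandeep-sala/Code | code-wars/py/A_Rule_of_Divisibility_by_13.py | thirt
-- ===== SOURCE A (Python) =====
-- def thirt(n, v=0, b=[1, 10, 9, 12, 3, 4]):
--     n = sum(
--         [
--             n1 * n2
--             for n1, n2 in zip(
--                 [int(x) for x in str(n)][::-1],
--                 [b[i - 6] if i > 5 else b[i] for i in range(len(str(n)))],
--             )
--         ]
--     )
--     if n == v:
--         return n
--     return thirt(n, n)
-- ===== SOURCE B (Python) =====
-- WEIGHTS = [1, 10, 9, 12, 3, 4]
--
--
-- def weighted_sum(m, b=WEIGHTS):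
--     """One application of the divisibility-by-13 rule: each digit of m
--     (least significant first) times the cyclic weight table."""
--     total, i = 0, 0
--     while m > 0:
--         total += (m % 10) * (b[i - 6] if i > 5 else b[i])
--         m //= 10
--         i += 1
--     return total
--
--
-- def thirt(n, v=0, b=WEIGHTS):
--     s = weighted_sum(n, b)
--     while s != v:
--         v = s
--         s = weighted_sum(s)
--     return s
-- ===== Notes on version B (the rewrite author's own statement) =====
-- stated objective: alternative
-- what changed: A's string-based tail recursion (str(n), per-char int(), zip with a precomputed weight list) is replaced by an iterative fixed-point loop over a weighted_sum helper that extracts digits arithmetically with divmod; Pre_ excludes exactly the inputs where A raises (negative n or a negative first sum hit int('-') with ValueError, too-short b hits IndexError).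
import Mathlib
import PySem

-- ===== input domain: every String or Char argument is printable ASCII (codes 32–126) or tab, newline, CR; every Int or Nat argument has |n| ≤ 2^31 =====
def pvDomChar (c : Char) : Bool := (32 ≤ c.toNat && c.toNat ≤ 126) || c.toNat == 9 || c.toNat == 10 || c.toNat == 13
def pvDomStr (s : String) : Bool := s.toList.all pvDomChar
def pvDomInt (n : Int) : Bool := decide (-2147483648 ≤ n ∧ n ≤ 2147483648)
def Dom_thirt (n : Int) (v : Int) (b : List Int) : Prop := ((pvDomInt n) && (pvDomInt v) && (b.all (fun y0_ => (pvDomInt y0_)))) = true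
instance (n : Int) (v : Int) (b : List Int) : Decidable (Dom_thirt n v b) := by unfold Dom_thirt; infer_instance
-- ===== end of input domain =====

-- B replaces A's string-based tail recursion by an iterative fixed-point loop over a
-- weighted_sum helper that extracts digits arithmetically with divmod (objective: alternative).


-- ===== PORT A =====
-- int(x) for a single character x (0 where Python raises ValueError; such inputs are outside Pre_)
def pyDigitVal (c : Char) : Int := (PySem.Int.ofChars? [c]).getD 0

-- A's assignment: sum(n1*n2 for n1,n2 in zip([int(x) for x in str(n)][::-1],
--   [b[i-6] if i>5 else b[i] for i in range(len(str(n)))]))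
-- (out-of-range b[...] is IndexError in Python: total here via .getD 0, excluded by Pre_)
def thirtStepA (n : Int) (b : List Int) : Int :=
  ((((PySem.List.slice? (((PySem.Int.toChars n)).map pyDigitVal) none none (-1)).getD []).zip
    ((List.range (PySem.Int.toChars n).length).map (fun i : Nat =>
      if (i : Int) > 5 then (PySem.List.pyGet? b ((i : Int) - 6)).getD 0
      else (PySem.List.pyGet? b (i : Int)).getD 0))).map (fun p => p.1 * p.2)).sum

-- A's tail recursion `return thirt(n, n)` (the recursive call takes the default b), fuel-guarded for totality
def thirtRec : Nat → Int → Int → List Int → Int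
  | 0, _, _, _ => 0
  | fuel + 1, n, v, b =>
    let m := thirtStepA n b
    if m = v then m else thirtRec fuel m m [1, 10, 9, 12, 3, 4]

def thirt (n : Int) (v : Int) (b : List Int) : Int := thirtRec 1000 n v b

-- ===== PORT B =====
-- B's WEIGHTS constant
def pvWEIGHTS : List Int := [1, 10, 9, 12, 3, 4]

-- B's weighted_sum: `while m > 0` divmod digit extraction with a running total
-- (structural fuel guard for totality; called with fuel m.toNat + 1, enough since m shrinks tenfold per pass)
def weightedSumLoop : Nat → Int → Nat → Int → List Int → Int
  | 0, _, _, total, _ => total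
  | fuel + 1, m, i, total, w =>
    if 0 < m then
      weightedSumLoop fuel (PySem.Int.floordiv m 10) (i + 1)
        (total + PySem.Int.mod m 10 *
          (if (i : Int) > 5 then (PySem.List.pyGet? w ((i : Int) - 6)).getD 0
           else (PySem.List.pyGet? w (i : Int)).getD 0)) w
    else total

def weightedSum (m : Int) (b : List Int) : Int := weightedSumLoop (m.toNat + 1) m 0 0 b

-- B's `while s != v` fixed-point loop, fuel-guarded for totality
def thirtAltLoop : Nat → Int → Int → Int
  | 0, _, _ => 0
  | fuel + 1, s, v => if s = v then s else thirtAltLoop fuel (weightedSum s pvWEIGHTS) s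

def thirt_alt (n : Int) (v : Int) (b : List Int) : Int :=
  thirtAltLoop 1000 (weightedSum n b) v

-- ===== PRECONDITION & SPEC =====
-- spec-level weight `b[i-6] if i>5 else b[i]` and first weighted digit sum, independent of both ports
def pvWeight (b : List Int) (i : Nat) : Int := if 5 < i then b.getD (i - 6) 0 else b.getD i 0
def pvDigitSum (n : Int) (b : List Int) : Int :=
  ((Nat.digits 10 n.toNat).zipIdx.map (fun p => (p.1 : Int) * pvWeight b p.2)).sum
def pvNumDigits (n : Int) : Nat := max (Nat.digits 10 n.toNat).length 1

-- Pre_ = exactly the inputs on which Python A returns: n ≥ 0 (otherwise int('-') raises ValueError),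
-- b long enough for n's digit positions (otherwise IndexError), and the first weighted sum either
-- nonnegative (every later sum then uses the nonnegative default weights) or equal to v (immediate
-- return); a negative first sum ≠ v makes the recursive call raise ValueError on the '-' sign.
def Pre_thirt (n : Int) (v : Int) (b : List Int) : Prop :=
  0 ≤ n ∧ min (pvNumDigits n) 6 ≤ b.length ∧
    (0 ≤ pvDigitSum n b ∨ pvDigitSum n b = v)
instance (n : Int) (v : Int) (b : List Int) : Decidable (Pre_thirt n v b) := by
  unfold Pre_thirt; infer_instance

def pvWitness_thirt : Int × Int × List Int := (1234567, 0, [1, 10, 9, 12, 3, 4])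

def Spec_thirt (n : Int) (v : Int) (b : List Int) (out : Int) : Prop := out = thirt_alt n v b
instance (n : Int) (v : Int) (b : List Int) (out : Int) : Decidable (Spec_thirt n v b out) := by
  unfold Spec_thirt; infer_instance

-- ===== CLAIM (what is proved, stated in full; the proofs are below) =====
def Claim_equal_thirt : Prop := ∀ (n : Int) (v : Int) (b : List Int), Dom_thirt n v b → Pre_thirt n v b → Spec_thirt n v b (thirt n v b)

-- ===== LEMMAS AND PROOFS =====

lemma pyDigitVal_digitChar (d : Nat) (hd : d < 10) :
    pyDigitVal (Nat.digitChar d) = (d : Int) := by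
  interval_cases d <;> decide

lemma toDigitsCore_eq (fuel : Nat) : ∀ (n : Nat) (ds : List Char), n < fuel →
    Nat.toDigitsCore 10 fuel n ds =
      (if n = 0 then ['0'] else ((Nat.digits 10 n).map Nat.digitChar).reverse) ++ ds := by
  induction fuel with
  | zero => intro n ds h; omega
  | succ fuel ih =>
    intro n ds h
    rw [Nat.toDigitsCore]
    by_cases h0 : n / 10 = 0
    · rw [if_pos h0]
      by_cases hn : n = 0
      · subst hn; simp; decide
      · rw [if_neg hn]
        rw [Nat.digits_def' (by norm_num : 1 < 10) (by omega : 0 < n)]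
        rw [h0, Nat.digits_zero]
        simp
    · rw [if_neg h0]
      rw [ih (n / 10) _ (by omega)]
      rw [if_neg h0]
      have hn : 0 < n := by omega
      rw [Nat.digits_def' (by norm_num : 1 < 10) hn]
      rw [if_neg (by omega : ¬ n = 0)]
      simp

lemma toChars_nonneg (n : Int) (hn : 0 ≤ n) :
    PySem.Int.toChars n =
      if n.toNat = 0 then ['0'] else ((Nat.digits 10 n.toNat).map Nat.digitChar).reverse := by
  rw [PySem.Int.toChars, if_neg (by omega : ¬ n < 0), Nat.toDigits,
    toDigitsCore_eq (n.toNat + 1) n.toNat [] (by omega)]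
  simp

lemma zip_range'_sum (w : Nat → Int) : ∀ (ds : List Nat) (i : Nat),
    (((ds.map (fun d : Nat => (d : Int))).zip ((List.range' i ds.length).map w)).map
        (fun p => p.1 * p.2)).sum
      = ((ds.zipIdx i).map (fun p => (p.1 : Int) * w p.2)).sum := by
  intro ds
  induction ds with
  | nil => intro i; simp
  | cons d tl ih =>
    intro i
    rw [List.length_cons, List.range'_succ, List.map_cons, List.map_cons, List.zip_cons_cons,
      List.map_cons, List.sum_cons, List.zipIdx_cons, List.map_cons, List.sum_cons, ih (i + 1)]

lemma portWeight_eq (b : List Int) (i : Nat) :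
    (if (i : Int) > 5 then (PySem.List.pyGet? b ((i : Int) - 6)).getD 0
     else (PySem.List.pyGet? b (i : Int)).getD 0) = pvWeight b i := by
  unfold pvWeight
  by_cases h : 5 < i
  · rw [if_pos (by exact_mod_cast h), if_pos h]
    rw [(by omega : (i : Int) - 6 = ((i - 6 : Nat) : Int)), PySem.List.pyGet?_natCast]
    rw [List.getD_eq_getElem?_getD]
  · rw [if_neg (by exact_mod_cast h), if_neg h, PySem.List.pyGet?_natCast,
      List.getD_eq_getElem?_getD]

lemma stepA_eq_pvDigitSum (n : Int) (b : List Int) (hn : 0 ≤ n) :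
    thirtStepA n b = pvDigitSum n b := by
  unfold thirtStepA pvDigitSum
  rw [toChars_nonneg n hn]
  rw [PySem.List.slice?_none_none_neg_one]
  simp only [Option.getD_some]
  by_cases h0 : n.toNat = 0
  · rw [if_pos h0, h0, Nat.digits_zero]
    simp [pyDigitVal]
    exact Or.inl (by decide)
  · rw [if_neg h0]
    have hlt : ∀ d ∈ Nat.digits 10 n.toNat, d < 10 :=
      fun d hd => Nat.digits_lt_base (by norm_num) hd
    have hmap : ((Nat.digits 10 n.toNat).map Nat.digitChar).reverse.map pyDigitVal
        = ((Nat.digits 10 n.toNat).map (fun d : Nat => (d : Int))).reverse := by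
      rw [List.map_reverse, List.map_map]
      congr 1
      exact List.map_congr_left (fun d hd => pyDigitVal_digitChar d (hlt d hd))
    rw [hmap, List.reverse_reverse]
    simp only [portWeight_eq]
    rw [List.range_eq_range', List.length_reverse, List.length_map]
    exact zip_range'_sum (pvWeight b) (Nat.digits 10 n.toNat) 0

lemma weightedSumLoop_eq (fuel : Nat) : ∀ (m : Nat) (i : Nat) (total : Int) (b : List Int),
    m < 10 ^ fuel →
    weightedSumLoop fuel (m : Int) i total b
      = total + (((Nat.digits 10 m).zipIdx i).map (fun p => (p.1 : Int) * pvWeight b p.2)).sum := by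
  induction fuel with
  | zero => intro m i total b h; interval_cases m; simp [weightedSumLoop]
  | succ fuel ih =>
    intro m i total b h
    by_cases hm : 0 < m
    · rw [weightedSumLoop, if_pos (by exact_mod_cast hm)]
      rw [show (10 : Int) = ((10 : Nat) : Int) from rfl, PySem.Int.floordiv_natCast,
        PySem.Int.mod_natCast, portWeight_eq,
        ih (m / 10) (i + 1) _ b (by
          have : 10 ^ (fuel + 1) = 10 ^ fuel * 10 := by ring
          omega)]
      rw [Nat.digits_def' (by norm_num : 1 < 10) hm, List.zipIdx_cons, List.map_cons,
        List.sum_cons]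
      ring
    · have : m = 0 := by omega
      subst this
      rw [weightedSumLoop, if_neg (by omega)]
      simp

lemma weightedSum_eq_pvDigitSum (n : Int) (b : List Int) (hn : 0 ≤ n) :
    weightedSum n b = pvDigitSum n b := by
  have hb : n.toNat < 10 ^ (n.toNat + 1) :=
    lt_of_lt_of_le (Nat.lt_pow_self (by norm_num))
      (Nat.pow_le_pow_right (by norm_num) (Nat.le_succ _))
  have h := weightedSumLoop_eq (n.toNat + 1) n.toNat 0 0 b hb
  rw [show ((n.toNat : Int)) = n by omega] at h
  unfold weightedSum
  rw [h, zero_add]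
  rfl

lemma pvWeight_default_nonneg (i : Nat) : 0 ≤ pvWeight ([1, 10, 9, 12, 3, 4] : List Int) i := by
  have hD : ∀ j : Nat, 0 ≤ ([1, 10, 9, 12, 3, 4] : List Int).getD j 0 := by
    intro j
    rcases j with _|_|_|_|_|_|j <;> simp [List.getD]
  unfold pvWeight
  split_ifs <;> exact hD _

lemma pvDigitSum_default_nonneg (n : Int) : 0 ≤ pvDigitSum n ([1, 10, 9, 12, 3, 4] : List Int) := by
  unfold pvDigitSum
  apply List.sum_nonneg
  intro x hx
  simp only [List.mem_map] at hx
  obtain ⟨p, _, rfl⟩ := hx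
  exact mul_nonneg (by positivity) (pvWeight_default_nonneg p.2)

-- A's recursion and B's loop are in lockstep: after the first pass both iterate the default table
lemma rec_eq_loop (fuel : Nat) : ∀ (n v : Int) (b : List Int), 0 ≤ n →
    (0 ≤ pvDigitSum n b ∨ pvDigitSum n b = v) →
    thirtRec (fuel + 1) n v b = thirtAltLoop (fuel + 1) (weightedSum n b) v := by
  induction fuel with
  | zero =>
    intro n v b hn _
    rw [thirtRec, thirtAltLoop]
    simp only [stepA_eq_pvDigitSum n b hn, weightedSum_eq_pvDigitSum n b hn]
    by_cases hv : pvDigitSum n b = v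
    · rw [if_pos hv, if_pos hv]
    · rw [if_neg hv, if_neg hv]; rfl
  | succ fuel ih =>
    intro n v b hn h3
    rw [thirtRec, thirtAltLoop]
    simp only [stepA_eq_pvDigitSum n b hn, weightedSum_eq_pvDigitSum n b hn]
    by_cases hv : pvDigitSum n b = v
    · rw [if_pos hv, if_pos hv]
    · rw [if_neg hv, if_neg hv]
      have hm : 0 ≤ pvDigitSum n b := by rcases h3 with h | h; exact h; exact absurd h hv
      have := ih (pvDigitSum n b) (pvDigitSum n b) [1, 10, 9, 12, 3, 4] hm
        (Or.inl (pvDigitSum_default_nonneg _))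
      rw [show pvWEIGHTS = [1, 10, 9, 12, 3, 4] from rfl]
      exact this

-- ===== VERDICT (by name: the statement is the Claim_ definition above) =====
theorem thirt_spec : Claim_equal_thirt := by
  intro n v b _ hpre
  obtain ⟨h1, _, h3⟩ := hpre
  unfold Spec_thirt thirt thirt_alt
  exact rec_eq_loop 999 n v b h1 h3
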